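-- pv_equiv track=rewrite | github.com/lbliii/bengal | bengal/rendering/parsers/patitas/lexer.py | _calc_indent
-- ===== SOURCE A (Python) =====
-- def _calc_indent(line: str) -> tuple[int, int]:
--     """Calculate indent level and content start position.
--
--     Returns:
--         (indent_spaces, content_start_index)
--     """
--     indent = 0
--     pos = 0
--     line_len = len(line)  # Cache length
--     while pos < line_len:
--         char = line[pos]
--         if char == " ":
--             indent += 1
--             pos += 1
--         elif char == "\t":
--             indent += 4 - (indent % 4)
--             pos += 1
--         else:
--             break
--     return indent, pos
-- ===== SOURCE B (Python) =====
-- def _calc_indent(line: str) -> tuple[int, int]: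
--     """Boundary first via lstrip(' \t'), then fold indent over the prefix."""
--     stripped = line.lstrip(" \t")
--     pos = len(line) - len(stripped)
--     indent = 0
--     for ch in line[:pos]:
--         if ch == " ":
--             indent += 1
--         else:
--             indent += 4 - indent % 4
--     return indent, pos
-- ===== Notes on version B (the rewrite author's own statement) =====
-- stated objective: idiomatic
-- what changed: B finds the content boundary with a single lstrip(' \t') call and then folds the indent over the already-delimited prefix, instead of A's single interleaved scan that advances pos and indent together with a break.
import Mathlib
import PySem

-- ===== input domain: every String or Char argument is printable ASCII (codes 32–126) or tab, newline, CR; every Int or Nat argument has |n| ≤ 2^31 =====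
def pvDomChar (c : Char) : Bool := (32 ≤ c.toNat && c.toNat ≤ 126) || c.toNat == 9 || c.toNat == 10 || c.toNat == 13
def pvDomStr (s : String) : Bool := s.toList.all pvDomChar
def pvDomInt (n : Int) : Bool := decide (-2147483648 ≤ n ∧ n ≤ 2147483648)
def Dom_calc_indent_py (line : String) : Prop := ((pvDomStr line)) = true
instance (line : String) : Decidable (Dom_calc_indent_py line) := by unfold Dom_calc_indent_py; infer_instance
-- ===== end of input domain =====

-- B finds the content boundary with one lstrip(" \t") call, then folds the indent over the
-- delimited prefix, instead of A's interleaved scan-with-break; same O(n) cost, different decomposition.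

-- ===== PORT A =====
-- A's while loop: advance pos and indent together, break at the first non-space/tab.
def calcIndentLoop : List Char → Int → Int → Int × Int
  | [], indent, pos => (indent, pos)
  | c :: cs, indent, pos =>
    if c == ' ' then calcIndentLoop cs (indent + 1) (pos + 1)
    else if c == '\t' then calcIndentLoop cs (indent + (4 - PySem.Int.mod indent 4)) (pos + 1)
    else (indent, pos)

def calc_indent_py (line : String) : Int × Int := calcIndentLoop line.toList 0 0

-- ===== PORT B =====
def calc_indent_py_alt (line : String) : Int × Int :=
  let cs := line.toList
  -- line.lstrip(" \t"): drop leading chars from the set {' ', '\t'} (exact; hand-ported, PySem has no left-only chars strip)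
  let stripped := cs.dropWhile (fun c => c == ' ' || c == '\t')
  let pos : Int := (cs.length : Int) - (stripped.length : Int)
  let indent := (PySem.List.slice cs none (some pos)).foldl
      (fun ind ch => if ch == ' ' then ind + 1 else ind + (4 - PySem.Int.mod ind 4)) 0
  (indent, pos)

-- ===== PRECONDITION & SPEC =====
def Spec_calc_indent_py (line : String) (out : Int × Int) : Prop := out = calc_indent_py_alt line
instance (line : String) (out : Int × Int) : Decidable (Spec_calc_indent_py line out) := by unfold Spec_calc_indent_py; infer_instance

-- ===== CLAIM (what is proved, stated in full; the proofs are below) =====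
def Claim_equal_calc_indent_py : Prop := ∀ (line : String), Dom_calc_indent_py line → Spec_calc_indent_py line (calc_indent_py line)

-- ===== LEMMAS AND PROOFS =====

lemma calcIndentLoop_eq_foldl_takeWhile (cs : List Char) : ∀ (indent pos : Int),
    calcIndentLoop cs indent pos =
      ((cs.takeWhile (fun c => c == ' ' || c == '\t')).foldl
        (fun ind ch => if ch == ' ' then ind + 1 else ind + (4 - PySem.Int.mod ind 4)) indent,
       pos + ((cs.takeWhile (fun c => c == ' ' || c == '\t')).length : Int)) := by
  induction cs with
  | nil => intro indent pos; simp [calcIndentLoop]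
  | cons c cs ih =>
    intro indent pos
    by_cases hs : c = ' '
    · subst hs
      rw [calcIndentLoop, List.takeWhile_cons]
      simp [ih, add_assoc, add_comm]
    · by_cases ht : c = '\t'
      · subst ht
        rw [calcIndentLoop, List.takeWhile_cons]
        have : ('\t' == ' ') = false := by decide
        simp only [this, Bool.false_or, beq_self_eq_true, if_true]
        simp [ih, add_assoc, add_comm]
      · rw [calcIndentLoop, List.takeWhile_cons]
        have h1 : (c == ' ') = false := by simp [hs]
        have h2 : (c == '\t') = false := by simp [ht]
        simp [h1, h2]

lemma pos_eq_takeWhile_length (cs : List Char) :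
    (cs.length : Int) - ((cs.dropWhile (fun c => c == ' ' || c == '\t')).length : Int)
      = ((cs.takeWhile (fun c => c == ' ' || c == '\t')).length : Int) := by
  have h := List.takeWhile_append_dropWhile (p := fun c => c == ' ' || c == '\t') (l := cs)
  have hl := congrArg List.length h
  rw [List.length_append] at hl
  omega

-- ===== VERDICT (by name: the statement is the Claim_ definition above) =====
theorem calc_indent_py_spec : Claim_equal_calc_indent_py := by
  intro line _
  unfold Spec_calc_indent_py calc_indent_py calc_indent_py_alt
  dsimp only
  rw [pos_eq_takeWhile_length line.toList, PySem.List.slice_to_natCast,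
    ← List.prefix_iff_eq_take.mp (List.takeWhile_prefix _),
    calcIndentLoop_eq_foldl_takeWhile]
  simp
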